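-- pv_equiv track=rewrite | github.com/TNIFL/SafeToSpend | services/official_refs/source_policy.py | is_official_domain
-- ===== SOURCE A (Python) =====
-- OFFICIAL_ALLOWED_DOMAINS: tuple[str, ...] = (
--     "law.go.kr",
--     "www.law.go.kr",
--     "nhis.or.kr",
--     "www.nhis.or.kr",
--     "mohw.go.kr",
--     "www.mohw.go.kr",
--     "nts.go.kr",
--     "www.nts.go.kr",
-- )
--
-- def is_official_domain(hostname: str) -> bool:
--     host = str(hostname or "").strip().lower()
--     if not host:
--         return False
--     for domain in OFFICIAL_ALLOWED_DOMAINS: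
--         token = str(domain or "").strip().lower()
--         if not token:
--             continue
--         if host == token or host.endswith(f".{token}"):
--             return True
--     return False
-- ===== SOURCE B (Python) =====
-- OFFICIAL_ALLOWED_DOMAINS: tuple[str, ...] = (
--     "law.go.kr",
--     "www.law.go.kr",
--     "nhis.or.kr",
--     "www.nhis.or.kr",
--     "mohw.go.kr",
--     "www.mohw.go.kr",
--     "nts.go.kr",
--     "www.nts.go.kr",
-- )
--
-- ALLOWED = frozenset(OFFICIAL_ALLOWED_DOMAINS)
--
-- def is_official_domain(hostname: str) -> bool:
--     host = str(hostname or "").strip().lower()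
--     if not host:
--         return False
--     if host in ALLOWED:
--         return True
--     return any(host[i + 1:] in ALLOWED for i, ch in enumerate(host) if ch == '.')
-- ===== Notes on version B (the rewrite author's own statement) =====
-- stated objective: idiomatic
-- what changed: A scans the whole domain tuple re-normalizing each entry and testing equality or an endswith against the host; B builds a frozenset of the domains once and instead checks the host itself and each of its label-boundary suffixes (the tails starting right after a dot) with set lookups.
import Mathlib
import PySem

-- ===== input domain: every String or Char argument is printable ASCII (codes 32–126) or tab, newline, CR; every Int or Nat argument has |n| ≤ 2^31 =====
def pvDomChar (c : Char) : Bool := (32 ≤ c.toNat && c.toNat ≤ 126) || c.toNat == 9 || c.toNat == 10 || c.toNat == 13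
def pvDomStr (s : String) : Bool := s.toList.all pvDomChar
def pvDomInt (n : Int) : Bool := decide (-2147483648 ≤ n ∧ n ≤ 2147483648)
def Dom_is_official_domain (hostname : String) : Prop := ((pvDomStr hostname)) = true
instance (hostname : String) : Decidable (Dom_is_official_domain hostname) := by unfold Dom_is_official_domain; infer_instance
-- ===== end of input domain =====

-- B replaces A's scan of the domain tuple (each step an endswith test) by membership lookups
-- of the host and of its label-boundary suffixes in a set built once (idiomatic; same result).

-- ===== PORT A =====
-- OFFICIAL_ALLOWED_DOMAINS (strings as lists of code points, per the PySem.Chars convention)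
def officialDomainsA : List (List Char) :=
  ["law.go.kr".toList, "www.law.go.kr".toList, "nhis.or.kr".toList, "www.nhis.or.kr".toList,
   "mohw.go.kr".toList, "www.mohw.go.kr".toList, "nts.go.kr".toList, "www.nts.go.kr".toList]

-- A's for-loop with early return, step for step ('str(domain or "")' is the identity on str)
def loopA (host : List Char) : List (List Char) → Bool
  | [] => false
  | d :: ds =>
    let token := PySem.Chars.lower (PySem.Chars.strip d)
    if token = [] then loopA host ds
    else if host == token || PySem.Chars.endswith host ('.' :: token) then true
    else loopA host ds

def is_official_domain (hostname : String) : Bool :=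
  let host := PySem.Chars.lower (PySem.Chars.strip hostname.toList)
  if host = [] then false
  else loopA host officialDomainsA

-- ===== PORT B =====
-- ALLOWED = frozenset(OFFICIAL_ALLOWED_DOMAINS): the 8 literals are distinct, so membership in
-- the frozenset is membership in this list
def allowedB : List (List Char) := officialDomainsA

-- host[i + 1:] for each i with host[i] == '.', in order of i (Source B's generator)
def dotSuffixes : List Char → List (List Char)
  | [] => []
  | c :: rest => (if c = '.' then [rest] else []) ++ dotSuffixes rest

def is_official_domain_alt (hostname : String) : Bool :=
  let host := PySem.Chars.lower (PySem.Chars.strip hostname.toList)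
  if host = [] then false
  else if allowedB.contains host then true
  else (dotSuffixes host).any (fun s => allowedB.contains s)

-- ===== PRECONDITION & SPEC =====
def Spec_is_official_domain (hostname : String) (out : Bool) : Prop := out = is_official_domain_alt hostname
instance (hostname : String) (out : Bool) : Decidable (Spec_is_official_domain hostname out) := by unfold Spec_is_official_domain; infer_instance

-- ===== CLAIM (what is proved, stated in full; the proofs are below) =====
def Claim_equal_is_official_domain : Prop := ∀ (hostname : String), Dom_is_official_domain hostname → Spec_is_official_domain hostname (is_official_domain hostname)

-- ===== LEMMAS AND PROOFS =====

-- membership in the dot-suffix list is exactly "host ends with '.' followed by t"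
theorem mem_dotSuffixes (l t : List Char) : t ∈ dotSuffixes l ↔ ('.' :: t) <:+ l := by
  induction l with
  | nil => simp [dotSuffixes]
  | cons c rest ih =>
    simp only [dotSuffixes, List.mem_append, List.suffix_cons_iff, ih]
    by_cases hc : c = '.'
    · subst hc; simp
    · simp only [hc, if_false, List.not_mem_nil, false_or]
      constructor
      · exact Or.inr
      · rintro (h | h)
        · injection h with h1 h2; exact absurd h1.symm hc
        · exact h

-- what A's loop decides, for an arbitrary token list
theorem loopA_iff (host : List Char) (ts : List (List Char)) :
    loopA host ts = true ↔
    ∃ d ∈ ts, PySem.Chars.lower (PySem.Chars.strip d) ≠ [] ∧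
      (host = PySem.Chars.lower (PySem.Chars.strip d) ∨
       ('.' :: PySem.Chars.lower (PySem.Chars.strip d)) <:+ host) := by
  induction ts with
  | nil => simp [loopA]
  | cons d ds ih =>
    simp only [loopA]
    by_cases he : PySem.Chars.lower (PySem.Chars.strip d) = []
    · simp [he, ih]
    · by_cases hm : (host == PySem.Chars.lower (PySem.Chars.strip d)
          || PySem.Chars.endswith host ('.' :: PySem.Chars.lower (PySem.Chars.strip d))) = true
      · simp only [he, if_false, hm, if_true]
        simp only [Bool.or_eq_true, beq_iff_eq, PySem.Chars.endswith_iff] at hm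
        constructor
        · intro _; exact ⟨d, by simp, he, hm⟩
        · intro _; trivial
      · simp only [he, if_false, hm, Bool.false_eq_true, if_false, ih]
        simp only [Bool.or_eq_true, beq_iff_eq, PySem.Chars.endswith_iff] at hm
        rw [not_or] at hm
        constructor
        · rintro ⟨e, hes, h1, h2⟩; exact ⟨e, by simp [hes], h1, h2⟩
        · rintro ⟨e, hes, h1, h2⟩
          rcases List.mem_cons.mp hes with rfl | hes'
          · exact absurd h2 (by tauto)
          · exact ⟨e, hes', h1, h2⟩

-- on the fixed domain list, the scan and the suffix-lookup agree (tokens are already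
-- stripped, lowercase and nonempty)
theorem core_eq (host : List Char) :
    loopA host officialDomainsA =
    (if allowedB.contains host then true
     else (dotSuffixes host).any (fun s => allowedB.contains s)) := by
  rw [Bool.eq_iff_iff, loopA_iff]
  have htok : ∀ d ∈ officialDomainsA, PySem.Chars.lower (PySem.Chars.strip d) = d := by decide
  have hne : ∀ d ∈ officialDomainsA, d ≠ [] := by decide
  have hAB : ∀ x : List Char, x ∈ allowedB ↔ x ∈ officialDomainsA := fun _ => Iff.rfl
  constructor
  · rintro ⟨d, hd, -, hcase⟩
    rw [htok d hd] at hcase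
    simp only [Bool.if_true_left, Bool.or_eq_true, List.contains_iff_mem, List.any_eq_true,
      decide_eq_true_eq, mem_dotSuffixes, hAB]
    rcases hcase with rfl | hsuf
    · exact Or.inl hd
    · exact Or.inr ⟨d, hsuf, hd⟩
  · intro h
    simp only [Bool.if_true_left, Bool.or_eq_true, List.contains_iff_mem, List.any_eq_true,
      decide_eq_true_eq, mem_dotSuffixes, hAB] at h
    rcases h with hmem | ⟨s, hsuf, hmem⟩
    · exact ⟨host, hmem, by rw [htok host hmem]; exact ⟨hne host hmem, Or.inl rfl⟩⟩
    · exact ⟨s, hmem, by rw [htok s hmem]; exact ⟨hne s hmem, Or.inr hsuf⟩⟩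

-- ===== VERDICT (by name: the statement is the Claim_ definition above) =====
theorem is_official_domain_spec : Claim_equal_is_official_domain := by
  intro hostname _
  unfold Spec_is_official_domain is_official_domain is_official_domain_alt
  by_cases h : PySem.Chars.lower (PySem.Chars.strip hostname.toList) = []
  · simp [h]
  · simp only [h, if_false, core_eq]
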